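-- pv_equiv track=rewrite | github.com/FugginOld/plane-alert-db-non-tds | scripts/expand_aircraft_aliases_v2.py | sniff_public_columns
-- ===== SOURCE A (Python) =====
-- from typing import Dict, List, Optional, Sequence, Set, Tuple
--
-- PUBLIC_MATCHKEY_COLUMNS = (
--     "typecode", "icao_type", "aircraft_type", "designator", "match_key", "icao"
-- )
--
-- PUBLIC_MODEL_COLUMNS = (
--     "model", "manufacturername", "manufacturer_name", "type", "aircraft_model",
--     "description", "name", "model_name"
-- )
--
-- def sniff_public_columns(fieldnames: Sequence[str]) -> Tuple[Optional[str], Optional[str]]: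
--     lowered = {f.lower().strip(): f for f in fieldnames}
--     mk = None
--     model = None
--     for c in PUBLIC_MATCHKEY_COLUMNS:
--         if c in lowered:
--             mk = lowered[c]
--             break
--     for c in PUBLIC_MODEL_COLUMNS:
--         if c in lowered:
--             model = lowered[c]
--             break
--     return mk, model
-- ===== SOURCE B (Python) =====
-- PUBLIC_MATCHKEY_COLUMNS = (
--     "typecode", "icao_type", "aircraft_type", "designator", "match_key", "icao"
-- )
--
-- PUBLIC_MODEL_COLUMNS = (
--     "model", "manufacturername", "manufacturer_name", "type", "aircraft_model",
--     "description", "name", "model_name"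
-- )
--
-- def sniff_public_columns(fieldnames):
--     mk_rank = {c: i for i, c in enumerate(PUBLIC_MATCHKEY_COLUMNS)}
--     model_rank = {c: i for i, c in enumerate(PUBLIC_MODEL_COLUMNS)}
--     mk = model = None
--     best_mk = best_model = None
--     for f in fieldnames:
--         k = f.lower().strip()
--         r = mk_rank.get(k)
--         if r is not None and (best_mk is None or r <= best_mk):
--             mk, best_mk = f, r
--         r = model_rank.get(k)
--         if r is not None and (best_model is None or r <= best_model):
--             model, best_model = f, r
--     return mk, model
-- ===== Notes on version B (the rewrite author's own statement) =====
-- stated objective: alternative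
-- what changed: A builds a normalized-key dict of all fieldnames and then scans the two constant priority tuples for the first present key; B builds rank maps from the priority tuples once and makes a single pass over the fieldnames keeping the best-rank (ties to the last occurrence) matchkey and model candidates.
import Mathlib
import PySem

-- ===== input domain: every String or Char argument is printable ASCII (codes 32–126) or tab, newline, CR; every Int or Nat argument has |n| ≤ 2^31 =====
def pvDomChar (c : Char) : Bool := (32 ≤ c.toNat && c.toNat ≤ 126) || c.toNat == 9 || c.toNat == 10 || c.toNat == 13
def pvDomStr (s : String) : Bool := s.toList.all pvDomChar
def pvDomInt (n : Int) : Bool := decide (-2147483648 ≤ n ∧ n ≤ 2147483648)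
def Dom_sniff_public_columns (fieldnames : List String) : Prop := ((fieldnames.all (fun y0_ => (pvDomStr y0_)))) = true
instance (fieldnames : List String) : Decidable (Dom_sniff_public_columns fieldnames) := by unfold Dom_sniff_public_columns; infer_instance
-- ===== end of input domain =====

-- B replaces A's build-a-dict-then-scan-the-priority-tuples decomposition by one pass over the
-- fieldnames keeping a best-rank-so-far accumulator (rank maps built once); objective: alternative.

-- ===== PORT A =====
def pvMKCols : List String :=
  ["typecode", "icao_type", "aircraft_type", "designator", "match_key", "icao"]

def pvModelCols : List String :=
  ["model", "manufacturername", "manufacturer_name", "type", "aircraft_model",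
   "description", "name", "model_name"]

-- the 'for c in COLS: if c in lowered: … = lowered[c]; break' loop (None if no break)
def pvLoopA (d : PySem.Dict String String) : List String → Option String
  | [] => none
  | c :: cs => if d.contains c then d.get? c else pvLoopA d cs

def sniff_public_columns (fieldnames : List String) : Option String × Option String :=
  let lowered := fieldnames.foldl
    (fun d f => d.insert (PySem.Str.strip (PySem.Str.lower f)) f) PySem.Dict.empty
  (pvLoopA lowered pvMKCols, pvLoopA lowered pvModelCols)

-- ===== PORT B =====
-- {c: i for i, c in enumerate(cols)}
def pvRank (cols : List String) : PySem.Dict String Int :=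
  (PySem.List.enumerate cols).foldl (fun d p => d.insert p.2 p.1) PySem.Dict.empty

-- one conditional update of (best fieldname, best rank) by fieldname f whose normalized key is k
def pvUpd (rank : PySem.Dict String Int) (acc : Option String × Option Int)
    (k f : String) : Option String × Option Int :=
  match rank.get? k with
  | some r =>
    match acc.2 with
    | none => (some f, some r)
    | some b => if r ≤ b then (some f, some r) else acc
  | none => acc

def sniff_public_columns_alt (fieldnames : List String) : Option String × Option String :=
  let mkRank := pvRank pvMKCols
  let modelRank := pvRank pvModelCols
  let res := fieldnames.foldl
    (fun s f =>
      let k := PySem.Str.strip (PySem.Str.lower f)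
      (pvUpd mkRank s.1 k f, pvUpd modelRank s.2 k f))
    ((none, none), (none, none))
  (res.1.1, res.2.1)

-- ===== PRECONDITION & SPEC =====
def Spec_sniff_public_columns (fieldnames : List String) (out : Option String × Option String) : Prop := out = sniff_public_columns_alt fieldnames
instance (fieldnames : List String) (out : Option String × Option String) : Decidable (Spec_sniff_public_columns fieldnames out) := by unfold Spec_sniff_public_columns; infer_instance

-- ===== CLAIM (what is proved, stated in full; the proofs are below) =====
def Claim_equal_sniff_public_columns : Prop := ∀ (fieldnames : List String), Dom_sniff_public_columns fieldnames → Spec_sniff_public_columns fieldnames (sniff_public_columns fieldnames)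

-- ===== LEMMAS AND PROOFS =====

-- first scan hit together with its position
def pvScanI (d : PySem.Dict String String) : List String → Int → Option (String × Int)
  | [], _ => none
  | c :: cs, i =>
    match d.get? c with
    | some v => some (v, i)
    | none => pvScanI d cs (i + 1)

-- index of the first occurrence of k in cols, counting from i
def pvIdx : List String → Int → String → Option Int
  | [], _, _ => none
  | c :: cs, i, k => if k = c then some i else pvIdx cs (i + 1) k

def pvUnpack : Option (String × Int) → Option String × Option Int
  | none => (none, none)
  | some (v, r) => (some v, some r)

theorem pvLoopA_eq (d : PySem.Dict String String) (cols : List String) (i : Int) :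
    pvLoopA d cols = (pvScanI d cols i).map (·.1) := by
  induction cols generalizing i with
  | nil => rfl
  | cons c cs ih =>
    simp only [pvLoopA, pvScanI, PySem.Dict.contains_eq_isSome_get?]
    cases h : d.get? c <;> simp [ih (i + 1)]

theorem pvScanI_ge (d : PySem.Dict String String) (cols : List String) (i : Int)
    (w : String) (j : Int) (h : pvScanI d cols i = some (w, j)) : i ≤ j := by
  induction cols generalizing i with
  | nil => simp [pvScanI] at h
  | cons c cs ih =>
    simp only [pvScanI] at h
    cases hg : d.get? c with
    | some v =>
      rw [hg] at h
      have : i = j := by simpa using congrArg (fun o => (o.getD (w, 0)).2) h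
      omega
    | none =>
      rw [hg] at h
      have := ih (i + 1) h
      omega

theorem pvIdx_ge (cols : List String) (i : Int) (k : String) (r : Int)
    (h : pvIdx cols i k = some r) : i ≤ r := by
  induction cols generalizing i with
  | nil => simp [pvIdx] at h
  | cons c cs ih =>
    simp only [pvIdx] at h
    split at h
    · have : i = r := by simpa using h
      omega
    · have := ih (i + 1) h
      omega

theorem pvIdx_of_not_mem (cols : List String) (i : Int) (k : String) (h : k ∉ cols) :
    pvIdx cols i k = none := by
  induction cols generalizing i with
  | nil => rfl
  | cons c cs ih =>
    simp only [List.mem_cons, not_or] at h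
    simp [pvIdx, h.1, ih (i + 1) h.2]

theorem pvRank_get (cols : List String) (hnd : cols.Nodup) (k : String) :
    (pvRank cols).get? k = pvIdx cols 0 k := by
  suffices H : ∀ (cs : List String) (i : Int) (d : PySem.Dict String Int), cs.Nodup →
      (((PySem.List.enumerate cs i).foldl (fun d p => d.insert p.2 p.1) d).get? k
        = match pvIdx cs i k with
          | some r => some r
          | none => d.get? k) by
    have := H cols 0 PySem.Dict.empty hnd
    simp only [pvRank, this]
    cases pvIdx cols 0 k <;> simp [PySem.Dict.get?_empty]
  intro cs
  induction cs with
  | nil => intro i d _; rfl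
  | cons c cs ih =>
    intro i d hnd
    rw [List.nodup_cons] at hnd
    rw [PySem.List.enumerate_cons, List.foldl_cons, ih (i + 1) _ hnd.2]
    simp only [pvIdx]
    by_cases hk : k = c
    · subst hk
      rw [pvIdx_of_not_mem cs (i + 1) k hnd.1]
      simp [PySem.Dict.get?_insert_self]
    · simp only [hk, if_false]
      cases pvIdx cs (i + 1) k <;>
        simp [PySem.Dict.get?_insert, hk]

theorem pvScanI_insert (d : PySem.Dict String String) (cols : List String) (i : Int)
    (k v : String) :
    pvScanI (d.insert k v) cols i =
      match pvIdx cols i k, pvScanI d cols i with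
      | none, _ => pvScanI d cols i
      | some r, none => some (v, r)
      | some r, some (w, j) => if r ≤ j then some (v, r) else some (w, j) := by
  induction cols generalizing i with
  | nil => rfl
  | cons c cs ih =>
    simp only [pvScanI, pvIdx, PySem.Dict.get?_insert]
    by_cases hk : k = c
    · have hck : c = k := hk.symm
      rw [if_pos hck, if_pos hk]
      cases hg : d.get? c with
      | some w => simp
      | none =>
        cases hs : pvScanI d cs (i + 1) with
        | none => simp
        | some p =>
          obtain ⟨w, j⟩ := p
          have := pvScanI_ge d cs (i + 1) w j hs
          simp only
          rw [if_pos (by omega : i ≤ j)]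
    · have hck : ¬ c = k := fun h => hk h.symm
      rw [if_neg hck, if_neg hk]
      cases hg : d.get? c with
      | some w =>
        cases hr : pvIdx cs (i + 1) k with
        | none => simp
        | some r =>
          have := pvIdx_ge cs (i + 1) k r hr
          simp only
          rw [if_neg (by omega : ¬ r ≤ i)]
      | none => exact ih (i + 1)

-- B's one-pass fold over one column list computes the first-hit scan of A's dict
theorem pvFold_eq_scan (cols : List String) (hnd : cols.Nodup) (fs : List String) :
    fs.foldl (fun s f => pvUpd (pvRank cols) s (PySem.Str.strip (PySem.Str.lower f)) f)
        (none, none)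
      = pvUnpack (pvScanI
          (fs.foldl (fun d f => d.insert (PySem.Str.strip (PySem.Str.lower f)) f)
            PySem.Dict.empty) cols 0) := by
  induction fs using List.reverseRecOn with
  | nil =>
    suffices h : pvScanI PySem.Dict.empty cols 0 = none by simp [h, pvUnpack]
    have : ∀ (cs : List String) (i : Int), pvScanI PySem.Dict.empty cs i = none := by
      intro cs
      induction cs with
      | nil => intro i; rfl
      | cons c cs ih => intro i; simp [pvScanI, PySem.Dict.get?_empty, ih (i + 1)]
    exact this cols 0
  | append_singleton fs f ih =>
    rw [List.foldl_append, List.foldl_append, List.foldl_cons, List.foldl_nil,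
      List.foldl_cons, List.foldl_nil, ih, pvScanI_insert]
    simp only [pvUpd, pvRank_get cols hnd]
    cases hr : pvIdx cols 0 (PySem.Str.strip (PySem.Str.lower f)) with
    | none => simp
    | some r =>
      cases hs : pvScanI (fs.foldl (fun d f => d.insert (PySem.Str.strip (PySem.Str.lower f)) f)
          PySem.Dict.empty) cols 0 with
      | none => simp [pvUnpack]
      | some p =>
        obtain ⟨w, j⟩ := p
        simp only [pvUnpack]
        split_ifs <;> rfl

theorem pvUnpack_fst (o : Option (String × Int)) : (pvUnpack o).1 = o.map (·.1) := by
  cases o with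
  | none => rfl
  | some p => obtain ⟨v, r⟩ := p; rfl

theorem pvMK_nodup : pvMKCols.Nodup := by decide
theorem pvModel_nodup : pvModelCols.Nodup := by decide

-- ===== VERDICT (by name: the statement is the Claim_ definition above) =====
theorem sniff_public_columns_spec : Claim_equal_sniff_public_columns := by
  intro fieldnames _
  simp only [Spec_sniff_public_columns, sniff_public_columns, sniff_public_columns_alt]
  rw [PySem.List.foldl_prod_mk
    (f := fun s f => pvUpd (pvRank pvMKCols) s (PySem.Str.strip (PySem.Str.lower f)) f)
    (g := fun s f => pvUpd (pvRank pvModelCols) s (PySem.Str.strip (PySem.Str.lower f)) f)]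
  rw [pvFold_eq_scan pvMKCols pvMK_nodup, pvFold_eq_scan pvModelCols pvModel_nodup]
  rw [pvUnpack_fst, pvUnpack_fst, pvLoopA_eq _ _ 0, pvLoopA_eq _ _ 0]
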